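-- pv_equiv track=rewrite | github.com/goodnessm3/snekbot | clean_text.py | discordStringEscape
-- ===== SOURCE A (Python) =====
-- discordFormatChars = [
--     "`",
--     "*",
--     "_",
--     "|"
-- ]
--
-- def discordStringEscape(str):
--     reslist = list(str)
--     i = 0
--     while i < len(reslist):
--         if reslist[i] in discordFormatChars:
--             if i == 0 or reslist[i-1] != '\\':
--                 reslist.insert(i, "\\")
--                 i += 1
--
--         i += 1
--     return "".join(reslist)
-- ===== SOURCE B (Python) =====
-- discordFormatChars = [
--     "`",
--     "*",
--     "_",
--     "|"
-- ]
--
-- def discordStringEscape(str):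
--     out = []
--     prev = None
--     for c in str:
--         if c in discordFormatChars and prev != "\\":
--             out.append("\\")
--         out.append(c)
--         prev = c
--     return "".join(out)
-- ===== Notes on version B (the rewrite author's own statement) =====
-- stated objective: simpler
-- what changed: Replaced the index-walking loop that inserts backslashes into a mutable list (shifting positions and re-reading the list for the previous char) by a single forward pass that builds the output list while tracking the previous original character.
import Mathlib
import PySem

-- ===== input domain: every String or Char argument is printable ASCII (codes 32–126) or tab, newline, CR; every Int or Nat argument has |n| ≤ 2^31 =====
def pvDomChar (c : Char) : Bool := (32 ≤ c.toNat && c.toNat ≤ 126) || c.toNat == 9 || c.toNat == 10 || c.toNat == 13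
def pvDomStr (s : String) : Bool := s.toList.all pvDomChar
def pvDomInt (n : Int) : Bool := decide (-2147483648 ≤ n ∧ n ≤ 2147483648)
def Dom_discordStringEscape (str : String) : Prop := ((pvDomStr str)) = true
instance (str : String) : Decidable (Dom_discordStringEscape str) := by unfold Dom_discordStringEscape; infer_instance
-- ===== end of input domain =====

-- B replaces A's index-walking loop that inserts into a mutable list (re-scanning shifted
-- positions) by a single forward pass building the output with a previous-character
-- accumulator; objective: simpler.

-- ===== PORT A =====
def discordFormatCharsP : List Char := ['`', '*', '_', '|']

-- the while loop: reslist mutates via insert, i steps by 1 or 2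
def aLoop (reslist : List Char) (i : Nat) : List Char :=
  if h : i < reslist.length then
    if reslist[i] ∈ discordFormatCharsP ∧
        (i = 0 ∨ reslist[i-1]'(Nat.lt_of_le_of_lt (Nat.pred_le i) h) ≠ '\\') then
      aLoop (PySem.List.insert reslist (i : Int) '\\') (i + 2)
    else
      aLoop reslist (i + 1)
  else reslist
termination_by reslist.length - i
decreasing_by
  · have : (PySem.List.insert reslist (i : Int) '\\').length = reslist.length + 1 := by
      rw [PySem.List.insert_natCast reslist i '\\' (Nat.le_of_lt h)]
      simp
    omega
  · omega

def discordStringEscape (str : String) : String := String.ofList (aLoop str.toList 0)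

-- ===== PORT B =====
-- loop body of B: maybe append a backslash, append c, remember c as prev
def bStep (acc : List Char × Option Char) (c : Char) : List Char × Option Char :=
  let out1 := if c ∈ discordFormatCharsP ∧ acc.2 ≠ some '\\' then acc.1 ++ ['\\'] else acc.1
  (out1 ++ [c], some c)

def discordStringEscape_alt (str : String) : String :=
  String.ofList (str.toList.foldl bStep ([], none)).1

-- ===== PRECONDITION & SPEC =====
def Spec_discordStringEscape (str : String) (out : String) : Prop := out = discordStringEscape_alt str
instance (str : String) (out : String) : Decidable (Spec_discordStringEscape str out) := by unfold Spec_discordStringEscape; infer_instance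

-- ===== CLAIM (what is proved, stated in full; the proofs are below) =====
def Claim_equal_discordStringEscape : Prop := ∀ (str : String), Dom_discordStringEscape str → Spec_discordStringEscape str (discordStringEscape str)

-- ===== LEMMAS AND PROOFS =====

-- what B produces for the remaining characters, given the previous character
def goB : List Char → Option Char → List Char
  | [], _ => []
  | c :: rest, prev =>
      (if c ∈ discordFormatCharsP ∧ prev ≠ some '\\' then ['\\', c] else [c]) ++ goB rest (some c)

theorem foldl_bStep (rest : List Char) (acc : List Char) (prev : Option Char) :
    (rest.foldl bStep (acc, prev)).1 = acc ++ goB rest prev := by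
  induction rest generalizing acc prev with
  | nil => simp [goB]
  | cons c rest ih =>
      simp only [List.foldl_cons, goB, bStep]
      rw [ih]
      split_ifs <;> simp

-- A's loop invariant: the first i = done.length characters are final output, the rest is the
-- untouched original suffix, and done's last char is the original previous char.
theorem aLoop_eq (rest done : List Char) :
    aLoop (done ++ rest) done.length = done ++ goB rest done.getLast? := by
  induction rest generalizing done with
  | nil => rw [aLoop]; simp [goB]
  | cons c rest ih =>
      rw [aLoop]
      have hlt : done.length < (done ++ c :: rest).length := by simp
      rw [dif_pos hlt]
      have hget : (done ++ c :: rest)[done.length]'hlt = c := by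
        simp
      have hcond : ((done ++ c :: rest)[done.length]'hlt ∈ discordFormatCharsP ∧
          (done.length = 0 ∨ (done ++ c :: rest)[done.length - 1]'(Nat.lt_of_le_of_lt (Nat.pred_le _) hlt) ≠ '\\'))
          ↔ (c ∈ discordFormatCharsP ∧ done.getLast? ≠ some '\\') := by
        rw [hget]
        rcases eq_or_ne done [] with h | h
        · subst h; simp
        · have h0 : done.length ≠ 0 := by simpa using h
          have h1 : done.length - 1 < done.length := by omega
          have hidx : (done ++ c :: rest)[done.length - 1]'(Nat.lt_of_le_of_lt (Nat.pred_le _) hlt)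
              = done[done.length - 1]'h1 := List.getElem_append_left h1
          rw [hidx, List.getLast?_eq_some_getLast h, ← List.getLast_eq_getElem h]
          simp [h0]
      by_cases hc : c ∈ discordFormatCharsP ∧ done.getLast? ≠ some '\\'
      · rw [if_pos (hcond.mpr hc)]
        have hins : PySem.List.insert (done ++ c :: rest) ((done.length : Nat) : Int) '\\'
            = (done ++ ['\\', c]) ++ rest := by
          rw [PySem.List.insert_natCast _ _ _ (by simp)]
          simp
        rw [hins]
        have hlen : done.length + 2 = (done ++ ['\\', c]).length := by simp
        rw [hlen, ih (done ++ ['\\', c])]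
        simp [goB, hc]
      · rw [if_neg (fun h => hc (hcond.mp h))]
        have h1 : done ++ c :: rest = (done ++ [c]) ++ rest := by simp
        have hlen : done.length + 1 = (done ++ [c]).length := by simp
        rw [h1, hlen, ih (done ++ [c])]
        simp [goB, if_neg hc]

-- ===== VERDICT (by name: the statement is the Claim_ definition above) =====
theorem discordStringEscape_spec : Claim_equal_discordStringEscape := by
  intro str _
  unfold Spec_discordStringEscape discordStringEscape discordStringEscape_alt
  rw [foldl_bStep]
  exact congrArg String.ofList (by simpa using aLoop_eq str.toList [])
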